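-- pv_equiv track=rewrite | github.com/uglyswap/devora-saas-v2 | orchestration/core/quality_gate_engine.py | _parse_check_output
-- ===== SOURCE A (Python) =====
-- from typing import Any, Dict, List, Optional, Callable, Tuple
--
-- def _parse_check_output(
--
--     check_name: str,
--     output: str
-- ) -> List[Dict[str, Any]]:
--     """Parse check output to extract issues.
--
--     Args:
--         check_name: Name of the check
--         output: Command output
--
--     Returns:
--         List of parsed issues
--     """
--     issues = []
--
--     # Simple parsing for common patterns
--     lines = output.split('\n')
--
--     for line in lines:
--         line = line.strip()
--         if not line:
--             continue
--
--         # ESLint pattern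
--         if 'error' in line.lower() or 'warning' in line.lower():
--             issues.append({
--                 "type": "lint_issue",
--                 "message": line,
--                 "severity": "error" if "error" in line.lower() else "warning"
--             })
--
--         # TypeScript pattern
--         elif line.endswith('.ts') or line.endswith('.tsx'):
--             issues.append({
--                 "type": "type_error",
--                 "message": line,
--                 "severity": "error"
--             })
--
--         # Test failure pattern
--         elif 'test failed' in line.lower() or 'failed test' in line.lower():
--             issues.append({
--                 "type": "test_failure",
--                 "message": line,
--                 "severity": "error"
--             })
--
--         # Security vulnerability pattern
--         elif 'vulnerability' in line.lower() or 'cve-' in line.lower():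
--             issues.append({
--                 "type": "security_issue",
--                 "message": line,
--                 "severity": "critical"
--             })
--
--     return issues
-- ===== SOURCE B (Python) =====
-- def _parse_check_output(check_name, output):
--     # Staged passes: index+strip the lines once, extract each issue category in
--     # its own pass (priority encoded by excluding higher-priority predicates),
--     # then merge the tagged issues back into line order at the end.
--     def p1(l):
--         low = l.lower()
--         return 'error' in low or 'warning' in low
--
--     def p2(l):
--         return l.endswith('.ts') or l.endswith('.tsx')
--
--     def p3(l):
--         low = l.lower()
--         return 'test failed' in low or 'failed test' in low
--
--     def p4(l):
--         low = l.lower()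
--         return 'vulnerability' in low or 'cve-' in low
--
--     indexed = [(i, l) for i, l in
--                ((i, raw.strip()) for i, raw in enumerate(output.split('\n')))
--                if l]
--
--     lint = [(i, {"type": "lint_issue", "message": l,
--                  "severity": "error" if "error" in l.lower() else "warning"})
--             for i, l in indexed if p1(l)]
--     typ = [(i, {"type": "type_error", "message": l, "severity": "error"})
--            for i, l in indexed if not p1(l) and p2(l)]
--     test = [(i, {"type": "test_failure", "message": l, "severity": "error"})
--             for i, l in indexed if not p1(l) and not p2(l) and p3(l)]
--     sec = [(i, {"type": "security_issue", "message": l, "severity": "critical"})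
--            for i, l in indexed if not p1(l) and not p2(l) and not p3(l) and p4(l)]
--
--     return [d for _, d in sorted(lint + typ + test + sec, key=lambda t: t[0])]
-- ===== Notes on version B (the rewrite author's own statement) =====
-- stated objective: alternative
-- what changed: Replaces A's single-pass if/elif-append loop with staged passes: lines are indexed and stripped once, each issue category is extracted in its own comprehension pass (priority encoded by excluding higher-priority predicates), and the four tagged lists are merged back into line order with a sort on the line index.
import Mathlib
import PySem

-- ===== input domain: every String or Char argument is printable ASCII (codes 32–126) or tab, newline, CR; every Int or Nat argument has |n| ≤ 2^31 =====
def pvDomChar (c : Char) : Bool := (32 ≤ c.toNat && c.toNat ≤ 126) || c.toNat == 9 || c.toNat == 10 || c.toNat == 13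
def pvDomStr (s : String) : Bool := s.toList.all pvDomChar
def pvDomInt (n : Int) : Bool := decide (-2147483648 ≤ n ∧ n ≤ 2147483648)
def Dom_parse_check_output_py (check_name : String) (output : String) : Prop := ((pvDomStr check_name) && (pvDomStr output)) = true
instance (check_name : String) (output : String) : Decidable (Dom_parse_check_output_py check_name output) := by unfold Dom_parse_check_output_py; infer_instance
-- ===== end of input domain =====

-- B restructures A's single-pass if/elif loop into staged per-category passes merged back by line index (alternative, same cost).

-- ===== PORT A =====
-- split? is some here: the separator "\n" is a nonempty literal, so .getD [] is exact
def parse_check_output_py (_check_name : String) (output : String) : List (List (String × String)) :=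
  ((PySem.Str.split? output "\n").getD []).foldl (fun issues rawline =>
    let line := PySem.Str.strip rawline
    if line = "" then issues
    else if PySem.Str.isIn "error" (PySem.Str.lower line) || PySem.Str.isIn "warning" (PySem.Str.lower line) then
      issues ++ [[("type", "lint_issue"), ("message", line),
                  ("severity", if PySem.Str.isIn "error" (PySem.Str.lower line) then "error" else "warning")]]
    else if PySem.Str.endswith line ".ts" || PySem.Str.endswith line ".tsx" then
      issues ++ [[("type", "type_error"), ("message", line), ("severity", "error")]]
    else if PySem.Str.isIn "test failed" (PySem.Str.lower line) || PySem.Str.isIn "failed test" (PySem.Str.lower line) then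
      issues ++ [[("type", "test_failure"), ("message", line), ("severity", "error")]]
    else if PySem.Str.isIn "vulnerability" (PySem.Str.lower line) || PySem.Str.isIn "cve-" (PySem.Str.lower line) then
      issues ++ [[("type", "security_issue"), ("message", line), ("severity", "critical")]]
    else issues) []

-- ===== PORT B =====
-- the four category predicates of Source B
def pvP1 (l : String) : Bool := PySem.Str.isIn "error" (PySem.Str.lower l) || PySem.Str.isIn "warning" (PySem.Str.lower l)
def pvP2 (l : String) : Bool := PySem.Str.endswith l ".ts" || PySem.Str.endswith l ".tsx"
def pvP3 (l : String) : Bool := PySem.Str.isIn "test failed" (PySem.Str.lower l) || PySem.Str.isIn "failed test" (PySem.Str.lower l)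
def pvP4 (l : String) : Bool := PySem.Str.isIn "vulnerability" (PySem.Str.lower l) || PySem.Str.isIn "cve-" (PySem.Str.lower l)

-- the issue dicts built per category
def pvLintD (l : String) : List (String × String) :=
  [("type", "lint_issue"), ("message", l),
   ("severity", if PySem.Str.isIn "error" (PySem.Str.lower l) then "error" else "warning")]
def pvTypeD (l : String) : List (String × String) := [("type", "type_error"), ("message", l), ("severity", "error")]
def pvTestD (l : String) : List (String × String) := [("type", "test_failure"), ("message", l), ("severity", "error")]
def pvSecD (l : String) : List (String × String) := [("type", "security_issue"), ("message", l), ("severity", "critical")]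

-- indexed = the non-empty stripped lines, tagged with their line index (Source B's `indexed`)
def pvIndexed (output : String) : List (Int × String) :=
  ((PySem.List.enumerate ((PySem.Str.split? output "\n").getD [])).map
    (fun p => (p.1, PySem.Str.strip p.2))).filter (fun p => p.2 ≠ "")

-- the four staged category passes of Source B (lint + typ + test + sec), already concatenated
def pvMerged (idx : List (Int × String)) : List (Int × List (String × String)) :=
  (idx.filter (fun p => pvP1 p.2)).map (fun p => (p.1, pvLintD p.2)) ++
  (idx.filter (fun p => !pvP1 p.2 && pvP2 p.2)).map (fun p => (p.1, pvTypeD p.2)) ++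
  (idx.filter (fun p => !pvP1 p.2 && !pvP2 p.2 && pvP3 p.2)).map (fun p => (p.1, pvTestD p.2)) ++
  (idx.filter (fun p => !pvP1 p.2 && !pvP2 p.2 && !pvP3 p.2 && pvP4 p.2)).map (fun p => (p.1, pvSecD p.2))

def parse_check_output_py_alt (_check_name : String) (output : String) : List (List (String × String)) :=
  (PySem.List.sorted (pvMerged (pvIndexed output)) (fun t => t.1) false).map (fun t => t.2)

-- ===== PRECONDITION & SPEC =====
def Spec_parse_check_output_py (check_name : String) (output : String) (out : List (List (String × String))) : Prop := out = parse_check_output_py_alt check_name output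
instance (check_name : String) (output : String) (out : List (List (String × String))) : Decidable (Spec_parse_check_output_py check_name output out) := by unfold Spec_parse_check_output_py; infer_instance

-- ===== CLAIM =====
def Claim_equal_parse_check_output_py : Prop := ∀ (check_name : String) (output : String), Dom_parse_check_output_py check_name output → Spec_parse_check_output_py check_name output (parse_check_output_py check_name output)

-- ===== LEMMAS AND PROOFS =====

-- proof-side view of the per-line classification (first match of the four rules)
def pvTag (p : Int × String) : Option (Int × List (String × String)) :=
  if pvP1 p.2 then some (p.1, pvLintD p.2)
  else if pvP2 p.2 then some (p.1, pvTypeD p.2)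
  else if pvP3 p.2 then some (p.1, pvTestD p.2)
  else if pvP4 p.2 then some (p.1, pvSecD p.2)
  else none

-- generic: four priority-exclusive staged passes are a rearrangement of the single first-match pass
lemma pv_perm_gen {α β : Type} (q1 q2 q3 q4 : α → Bool) (f1 f2 f3 f4 : α → β) (L : List α) :
    (L.filterMap (fun x => if q1 x then some (f1 x) else if q2 x then some (f2 x)
      else if q3 x then some (f3 x) else if q4 x then some (f4 x) else none)).Perm
    ((L.filter q1).map f1 ++ (L.filter (fun x => !q1 x && q2 x)).map f2 ++
     (L.filter (fun x => !q1 x && !q2 x && q3 x)).map f3 ++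
     (L.filter (fun x => !q1 x && !q2 x && !q3 x && q4 x)).map f4) := by
  induction L with
  | nil => simp
  | cons x rest ih =>
    simp only [List.filterMap_cons, List.filter_cons, List.append_assoc] at *
    by_cases h1 : q1 x
    · simpa [h1] using ih.cons (f1 x)
    · by_cases h2 : q2 x
      · simp only [h1, h2, if_true, if_false, Bool.not_true, Bool.not_false, Bool.true_and,
          Bool.false_and, decide_true, decide_false, if_neg, List.map_cons]
        simp [h1, h2]
        exact (ih.cons (f2 x)).trans (List.perm_middle.symm)
      · by_cases h3 : q3 x
        · simp [h1, h2, h3, - List.append_assoc]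
          refine (ih.cons (f3 x)).trans ?_
          simpa [List.append_assoc] using
            (List.perm_middle (a := f3 x)
              (l₁ := (rest.filter q1).map f1 ++ (rest.filter (fun x => !q1 x && q2 x)).map f2)
              (l₂ := (rest.filter (fun x => !q1 x && !q2 x && q3 x)).map f3 ++
                     (rest.filter (fun x => !q1 x && !q2 x && !q3 x && q4 x)).map f4)).symm
        · by_cases h4 : q4 x
          · simp [h1, h2, h3, h4, - List.append_assoc]
            refine (ih.cons (f4 x)).trans ?_
            simpa [List.append_assoc] using
              (List.perm_middle (a := f4 x)
                (l₁ := (rest.filter q1).map f1 ++ (rest.filter (fun x => !q1 x && q2 x)).map f2 ++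
                       (rest.filter (fun x => !q1 x && !q2 x && q3 x)).map f3)
                (l₂ := (rest.filter (fun x => !q1 x && !q2 x && !q3 x && q4 x)).map f4)).symm
          · simpa [h1, h2, h3, h4] using ih

lemma pv_merged_perm (idx : List (Int × String)) : (idx.filterMap pvTag).Perm (pvMerged idx) := by
  simpa [pvTag, pvMerged] using pv_perm_gen (fun p : Int × String => pvP1 p.2) (fun p => pvP2 p.2)
    (fun p => pvP3 p.2) (fun p => pvP4 p.2) (fun p => (p.1, pvLintD p.2)) (fun p => (p.1, pvTypeD p.2))
    (fun p => (p.1, pvTestD p.2)) (fun p => (p.1, pvSecD p.2)) idx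

-- pvTag keeps the line index
lemma pv_tag_fst (p : Int × String) (q : Int × List (String × String)) (h : pvTag p = some q) :
    q.1 = p.1 := by
  unfold pvTag at h; split_ifs at h <;> simp_all <;> exact congrArg Prod.fst h.symm

-- filterMap by an index-preserving function keeps strictly increasing indices
lemma pv_tag_pairwise (idx : List (Int × String)) (h : idx.Pairwise (fun a b => a.1 < b.1)) :
    (idx.filterMap pvTag).Pairwise (fun a b => a.1 < b.1) := by
  induction idx with
  | nil => simp
  | cons x rest ih =>
    rw [List.pairwise_cons] at h
    rw [List.filterMap_cons]
    cases hfx : pvTag x with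
    | none => exact ih h.2
    | some y =>
      refine List.Pairwise.cons ?_ (ih h.2)
      intro b hb
      obtain ⟨a, ha, hfa⟩ := List.mem_filterMap.mp hb
      rw [pv_tag_fst _ _ hfx, pv_tag_fst _ _ hfa]
      exact h.1 a ha

-- indices in pvIndexed are strictly increasing
lemma pv_indexed_pairwise (output : String) :
    (pvIndexed output).Pairwise (fun a b => a.1 < b.1) := by
  unfold pvIndexed
  have h2 := List.Pairwise.map (S := fun (a b : Int × String) => a.1 < b.1)
    (fun p : Int × String => (p.1, PySem.Str.strip p.2)) (fun a b hab => hab)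
    (PySem.List.pairwise_lt_enumerate ((PySem.Str.split? output "\n").getD []) 0)
  exact List.Pairwise.sublist (List.filter_sublist) h2

-- A's per-line classification as an Option
def pvClassify (raw : String) : Option (List (String × String)) :=
  let line := PySem.Str.strip raw
  if line = "" then none
  else if pvP1 line then some (pvLintD line)
  else if pvP2 line then some (pvTypeD line)
  else if pvP3 line then some (pvTestD line)
  else if pvP4 line then some (pvSecD line)
  else none

-- the classification without the index
def pvCore (l : String) : Option (List (String × String)) :=
  if pvP1 l then some (pvLintD l)
  else if pvP2 l then some (pvTypeD l)
  else if pvP3 l then some (pvTestD l)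
  else if pvP4 l then some (pvSecD l)
  else none

lemma pv_tag_core (s : Int) (l : String) : pvTag (s, l) = (pvCore l).map (fun d => (s, d)) := by
  unfold pvTag pvCore; split_ifs <;> rfl

lemma pv_classify_core (raw : String) (h : ¬ PySem.Str.strip raw = "") :
    pvClassify raw = pvCore (PySem.Str.strip raw) := by
  unfold pvClassify pvCore; simp [h]

-- one step of A's loop appends exactly the classification of the line
lemma pv_step (issues : List (List (String × String))) (raw : String) :
    (let line := PySem.Str.strip raw
     if line = "" then issues
     else if pvP1 line then issues ++ [pvLintD line]
     else if pvP2 line then issues ++ [pvTypeD line]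
     else if pvP3 line then issues ++ [pvTestD line]
     else if pvP4 line then issues ++ [pvSecD line]
     else issues)
    = issues ++ (pvClassify raw).toList := by
  simp only [pvClassify]
  split_ifs <;> simp

-- A's fold over lines = filterMap of the per-line classification
lemma pv_foldl_eq (lines : List String) (acc : List (List (String × String))) :
    lines.foldl (fun issues rawline =>
      let line := PySem.Str.strip rawline
      if line = "" then issues
      else if PySem.Str.isIn "error" (PySem.Str.lower line) || PySem.Str.isIn "warning" (PySem.Str.lower line) then
        issues ++ [[("type", "lint_issue"), ("message", line),
                    ("severity", if PySem.Str.isIn "error" (PySem.Str.lower line) then "error" else "warning")]]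
      else if PySem.Str.endswith line ".ts" || PySem.Str.endswith line ".tsx" then
        issues ++ [[("type", "type_error"), ("message", line), ("severity", "error")]]
      else if PySem.Str.isIn "test failed" (PySem.Str.lower line) || PySem.Str.isIn "failed test" (PySem.Str.lower line) then
        issues ++ [[("type", "test_failure"), ("message", line), ("severity", "error")]]
      else if PySem.Str.isIn "vulnerability" (PySem.Str.lower line) || PySem.Str.isIn "cve-" (PySem.Str.lower line) then
        issues ++ [[("type", "security_issue"), ("message", line), ("severity", "critical")]]
      else issues) acc
    = acc ++ lines.filterMap pvClassify := by
  show lines.foldl (fun issues rawline =>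
      let line := PySem.Str.strip rawline
      if line = "" then issues
      else if pvP1 line then issues ++ [pvLintD line]
      else if pvP2 line then issues ++ [pvTypeD line]
      else if pvP3 line then issues ++ [pvTestD line]
      else if pvP4 line then issues ++ [pvSecD line]
      else issues) acc = acc ++ lines.filterMap pvClassify
  induction lines generalizing acc with
  | nil => simp
  | cons raw rest ih =>
    rw [List.foldl_cons, ih, pv_step]
    cases hc : pvClassify raw <;> simp [hc]

-- tagging the indexed lines then dropping the index = classifying the raw lines
lemma pv_tag_enum_eq (raws : List String) (s : Int) :
    ((((PySem.List.enumerate raws s).map (fun p => (p.1, PySem.Str.strip p.2))).filter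
      (fun p => p.2 ≠ "")).filterMap pvTag).map (fun t => t.2)
    = raws.filterMap pvClassify := by
  induction raws generalizing s with
  | nil => simp [PySem.List.enumerate_nil]
  | cons raw rest ih =>
    rw [PySem.List.enumerate_cons, List.map_cons, List.filter_cons, List.filterMap_cons]
    by_cases h0 : PySem.Str.strip raw = ""
    · have hc : pvClassify raw = none := by unfold pvClassify; simp [h0]
      simpa [h0, hc] using ih (s + 1)
    · simp only [h0, ne_eq, not_false_eq_true, decide_true, if_pos]
      have ih' := ih (s + 1)
      simp only [ne_eq, decide_not] at ih'
      cases hc : pvCore (PySem.Str.strip raw) <;>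
        simp [pv_tag_core, pv_classify_core raw h0, hc, ih']

-- ===== VERDICT =====
theorem parse_check_output_py_spec : Claim_equal_parse_check_output_py := by
  intro check_name output _
  unfold Spec_parse_check_output_py parse_check_output_py parse_check_output_py_alt
  rw [pv_foldl_eq, List.nil_append,
    PySem.List.sorted_eq_of_perm_of_pairwise_lt _ _ _ (pv_merged_perm (pvIndexed output))
      (pv_tag_pairwise _ (pv_indexed_pairwise output))]
  unfold pvIndexed
  rw [pv_tag_enum_eq]
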